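-- pv_equiv track=rewrite | github.com/lsh0927/Jungle10_Algo | 알고리즘고득점kit/스택&큐/프로세스.py | solution
-- ===== SOURCE A (Python) =====
-- from collections import deque, Counter
--
-- def solution(priorities, location):
--     q = deque()
--
--     # (인덱스, 우선순위) 쌍으로 큐 구성
--     for i in range(len(priorities)):
--         q.append((i, priorities[i]))
--
--     # 우선순위별 개수를 Counter로 관리
--     priority_count = Counter(priorities)
--
--     # 정렬된 우선순위 리스트 (내림차순)
--     sorted_priorities = sorted(priority_count.keys(), reverse=True)
--     current_max_idx = 0  # 현재 처리 중인 최대 우선순위의 인덱스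
--
--     seq = 0
--
--     while q:
--         cur_idx, cur_pri = q.popleft()
--         current_max = sorted_priorities[current_max_idx]
--
--         if cur_pri == current_max:
--             seq += 1
--             if cur_idx == location:
--                 return seq
--
--             # 해당 우선순위 개수 감소
--             priority_count[cur_pri] -= 1
--
--             # 해당 우선순위를 모두 처리했으면 다음 우선순위로 이동
--             if priority_count[cur_pri] == 0:
--                 current_max_idx += 1
--         else:
--             q.append((cur_idx, cur_pri))
--
--     return seq
-- ===== SOURCE B (Python) =====
-- def solution(priorities, location):
--     q = list(enumerate(priorities))
--     seq = 0
--     while q: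
--         m = max(pri for _, pri in q)
--         k = next(j for j, (_, pri) in enumerate(q) if pri == m)
--         idx = q[k][0]
--         q = q[k + 1:] + q[:k]
--         seq += 1
--         if idx == location:
--             return seq
--     return seq
-- ===== Notes on version B (the rewrite author's own statement) =====
-- stated objective: simpler
-- what changed: A simulates the printer queue element by element, requeueing non-maximal documents one popleft/append at a time while tracking the current maximum with a Counter, a sorted distinct-priority list and a moving pointer; B drops all that bookkeeping and, per printed document, scans the remaining queue for its first highest-priority element and rotates past it with one slice operation.
import Mathlib
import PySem

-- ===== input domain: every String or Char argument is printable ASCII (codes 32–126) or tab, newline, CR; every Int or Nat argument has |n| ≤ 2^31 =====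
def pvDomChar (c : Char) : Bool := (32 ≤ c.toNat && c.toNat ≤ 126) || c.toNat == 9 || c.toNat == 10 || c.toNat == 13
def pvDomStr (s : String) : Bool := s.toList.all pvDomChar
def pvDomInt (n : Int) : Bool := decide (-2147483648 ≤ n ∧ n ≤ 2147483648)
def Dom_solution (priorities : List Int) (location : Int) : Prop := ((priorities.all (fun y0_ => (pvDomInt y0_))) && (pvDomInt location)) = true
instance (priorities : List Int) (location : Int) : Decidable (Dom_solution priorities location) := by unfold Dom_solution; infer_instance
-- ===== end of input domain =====

-- B replaces A's deque-with-requeues plus Counter/sorted-priority bookkeeping by a direct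
-- rotation: each round it finds the first highest-priority document and rotates the queue past
-- it in one step (objective: simpler — no Counter, no sorted priority list, no pointer).

-- ===== PORT A =====
-- while-loop of A as fuel recursion; fuel (n+1)^2 bounds the requeue steps (proved sufficient
-- below). The `none`/fuel-0 fallbacks are unreachable on the states A actually reaches.
def aLoop (fuel : Nat) (q : List (Int × Int)) (pc : PySem.Dict Int Int) (sp : List Int)
    (cmi : Nat) (seq : Int) (location : Int) : Int :=
  match fuel with
  | 0 => seq
  | fuel + 1 =>
    match q with
    | [] => seq
    | (cur_idx, cur_pri) :: rest =>
      match sp[cmi]? with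
      | none => seq
      | some current_max =>
        if cur_pri = current_max then
          if cur_idx = location then seq + 1
          else
            let pc' := pc.insert cur_pri (pc.getD cur_pri 0 - 1)
            if pc'.getD cur_pri 0 = 0 then aLoop fuel rest pc' sp (cmi + 1) (seq + 1) location
            else aLoop fuel rest pc' sp cmi (seq + 1) location
        else aLoop fuel (rest ++ [(cur_idx, cur_pri)]) pc sp cmi seq location

def solution (priorities : List Int) (location : Int) : Int :=
  let q := PySem.List.enumerate priorities 0
  let priority_count := PySem.Dict.counter priorities
  let sorted_priorities := PySem.List.sorted priority_count.keys (fun x => x) true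
  aLoop ((priorities.length + 1) * (priorities.length + 1)) q priority_count sorted_priorities 0 0 location

-- ===== PORT B =====
def bLoop (location : Int) (q : List (Int × Int)) (seq : Int) : Int :=
  match _hm : PySem.List.max? (q.map (fun p => p.2)) (fun y => y) with
  | none => seq
  | some m =>
    let k := q.findIdx (fun p => p.2 == m)
    match _hk : q[k]? with
    | none => seq
    | some p =>
      if p.1 = location then seq + 1
      else bLoop location
        (PySem.List.slice q (some ((k : Int) + 1)) none ++ PySem.List.slice q none (some (k : Int)))
        (seq + 1)
termination_by q.length
decreasing_by
  have hk : k < q.length := by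
    have := List.getElem?_eq_some_iff.mp _hk
    exact this.1
  have hc : ((k : Int) + 1) = ((k + 1 : Nat) : Int) := by push_cast; ring
  rw [hc, PySem.List.slice_from_natCast, PySem.List.slice_to_natCast]
  simp
  omega

def solution_alt (priorities : List Int) (location : Int) : Int :=
  bLoop location (PySem.List.enumerate priorities 0) 0

-- ===== PRECONDITION & SPEC =====
def Spec_solution (priorities : List Int) (location : Int) (out : Int) : Prop := out = solution_alt priorities location
instance (priorities : List Int) (location : Int) (out : Int) : Decidable (Spec_solution priorities location out) := by unfold Spec_solution; infer_instance

-- ===== CLAIM (what is proved, stated in full; the proofs are below) =====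
def Claim_equal_solution : Prop := ∀ (priorities : List Int) (location : Int), Dom_solution priorities location → Spec_solution priorities location (solution priorities location)

-- ===== LEMMAS AND PROOFS =====

def AInv (q : List (Int × Int)) (pc : PySem.Dict Int Int) (sp : List Int) (cmi : Nat) : Prop :=
  sp.Pairwise (· > ·) ∧
  (∀ p ∈ q, p.2 ∈ sp.drop cmi) ∧
  (∀ c ∈ sp.drop cmi, pc.getD c 0 = ((q.map Prod.snd).count c : Int)) ∧
  (∀ c ∈ sp.drop cmi, c ∈ q.map Prod.snd)

theorem count_rotate (L : List Int) (c cm : Int) (k : Nat) (hk : k < L.length) (hgm : L[k] = cm) :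
    L.count c = ((L.drop (k+1) ++ L.take k).count c) + (if c = cm then 1 else 0) := by
  have h1 : L = L.take k ++ cm :: L.drop (k+1) := by
    conv_lhs => rw [← List.take_append_drop k L, ← List.getElem_cons_drop hk]
    rw [hgm]
  conv_lhs => rw [h1]
  by_cases hc : c = cm
  · simp [List.count_append, hc]
    omega
  · rw [List.count_append, List.count_cons, if_neg (by simp; omega), if_neg hc, List.count_append]
    omega


theorem rot (location : Int) (sp : List Int) (cmi : Nat) (cm : Int) (hcm : sp[cmi]? = some cm) :
  ∀ (k : Nat) (q : List (Int × Int)) (hk : k < q.length), (q[k]'hk).2 = cm →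
    (∀ j (hj : j < k), (q[j]'(Nat.lt_trans hj hk)).2 ≠ cm) →
    ∀ (fuel : Nat) (pc : PySem.Dict Int Int) (seq : Int),
    aLoop (fuel + (k+1)) q pc sp cmi seq location =
      if (q[k]'hk).1 = location then seq + 1
      else
        let pc' := pc.insert cm (pc.getD cm 0 - 1)
        if pc'.getD cm 0 = 0 then aLoop fuel (q.drop (k+1) ++ q.take k) pc' sp (cmi+1) (seq+1) location
        else aLoop fuel (q.drop (k+1) ++ q.take k) pc' sp cmi (seq+1) location := by
  intro k
  induction k with
  | zero =>
    intro q hk hqk _ fuel pc seq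
    match q with
    | (ci, cp) :: rest =>
      simp at hqk
      subst hqk
      simp [aLoop, hcm]
  | succ k ih =>
    intro q hk hqk hlt fuel pc seq
    match q with
    | p0 :: rest =>
      have hne : p0.2 ≠ cm := by
        have := hlt 0 (Nat.succ_pos k)
        simpa using this
      have hkr : k < rest.length := by simpa using hk
      have h1 : aLoop (fuel + (k+1+1)) (p0 :: rest) pc sp cmi seq location
          = aLoop (fuel + (k+1)) (rest ++ [p0]) pc sp cmi seq location := by
        show aLoop ((fuel + (k+1)) + 1) (p0 :: rest) pc sp cmi seq location = _
        match p0 with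
        | (ci, cp) => simp [aLoop, hcm, hne]
      rw [h1]
      have hk2 : k < (rest ++ [p0]).length := by simp; omega
      have hqk2 : ((rest ++ [p0])[k]'hk2).2 = cm := by
        rw [List.getElem_append_left hkr]
        simpa using hqk
      have hlt2 : ∀ j (hj : j < k), (((rest ++ [p0])[j]'(Nat.lt_trans hj hk2)).2 ≠ cm) := by
        intro j hj
        rw [List.getElem_append_left (Nat.lt_trans hj hkr)]
        have := hlt (j+1) (by omega)
        simpa using this
      rw [ih (rest ++ [p0]) hk2 hqk2 hlt2 fuel pc seq]
      have e1 : (rest ++ [p0]).drop (k+1) ++ (rest ++ [p0]).take k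
          = (p0 :: rest).drop (k+1+1) ++ (p0 :: rest).take (k+1) := by
        rw [List.drop_append_of_le_length (by omega), List.take_append_of_le_length (by omega)]
        simp
      have e2 : ((rest ++ [p0])[k]'hk2) = ((p0 :: rest)[k+1]'hk) := by
        rw [List.getElem_append_left hkr]
        simp
      rw [e1, e2]

theorem main_lemma (location : Int) (sp : List Int) :
    ∀ (n : Nat) (q : List (Int × Int)) (pc : PySem.Dict Int Int) (cmi : Nat) (seq : Int) (fuel : Nat),
      q.length = n → AInv q pc sp cmi → n * n < fuel →
      aLoop fuel q pc sp cmi seq location = bLoop location q seq := by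
  intro n
  induction n using Nat.strong_induction_on with
  | _ n ih =>
    intro q pc cmi seq fuel hlen hinv hfuel
    obtain ⟨hsp, hmem, hcnt, hpos⟩ := hinv
    match hq : q, fuel with
    | [], 0 => omega
    | [], fuel + 1 =>
      show seq = bLoop location [] seq
      rw [bLoop]
      rfl
    | p₀ :: q₀, fuel =>
      -- current max cm = sp[cmi]
      have hd : p₀.2 ∈ sp.drop cmi := hmem p₀ (List.mem_cons_self)
      have hcmi : cmi < sp.length := by
        by_contra h
        rw [List.drop_eq_nil_of_le (by omega)] at hd
        simp at hd
      set Q : List (Int × Int) := p₀ :: q₀ with hQ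
      set cm : Int := sp[cmi]'hcmi with hcmdef
      have hcm : sp[cmi]? = some cm := List.getElem?_eq_getElem hcmi
      have hdc : sp.drop cmi = cm :: sp.drop (cmi + 1) := List.drop_eq_getElem_cons hcmi
      have hgt : ∀ c ∈ sp.drop (cmi + 1), cm > c := by
        have h2 : (sp.drop cmi).Pairwise (· > ·) := hsp.drop
        rw [hdc] at h2
        exact (List.pairwise_cons.mp h2).1
      have hle : ∀ x ∈ Q.map Prod.snd, x ≤ cm := by
        intro x hx
        obtain ⟨p, hp, hpx⟩ := List.mem_map.mp hx
        have := hmem p hp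
        rw [hdc] at this
        rcases List.mem_cons.mp this with h | h
        · omega
        · have := hgt p.2 h; omega
      have hcmQ : cm ∈ Q.map Prod.snd := hpos cm (by rw [hdc]; exact List.mem_cons_self)
      -- max? of the priorities is cm
      have hm : PySem.List.max? (Q.map (fun p => p.2)) (fun y => y) = some cm := by
        match hmm : PySem.List.max? (Q.map (fun p => p.2)) (fun y => y) with
        | none =>
          rw [PySem.List.max?_eq_none_iff] at hmm
          simp [hQ] at hmm
        | some m =>
          have h1 : m ∈ Q.map (fun p => p.2) := PySem.List.max?_mem hmm
          have h2 := PySem.List.max?_isMax hmm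
          have h3 : cm ≤ m := h2 cm (by simpa using hcmQ)
          have h4 : m ≤ cm := hle m (by simpa using h1)
          exact (le_antisymm h4 h3) ▸ hmm
      -- first index with priority cm
      set k : Nat := Q.findIdx (fun p => p.2 == cm) with hkdef
      have hex : ∃ x ∈ Q, (fun (p : Int × Int) => p.2 == cm) x := by
        obtain ⟨p, hp, hpx⟩ := List.mem_map.mp hcmQ
        exact ⟨p, hp, by simp [hpx]⟩
      have hk : k < Q.length := List.findIdx_lt_length_of_exists hex
      have hqk : (Q[k]'hk).2 = cm := by
        have := List.findIdx_getElem (w := hk)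
        simpa using this
      have hltk : ∀ j (hj : j < k), (Q[j]'(Nat.lt_trans hj hk)).2 ≠ cm := by
        intro j hj
        simpa using List.not_of_lt_findIdx (p := fun (x : Int × Int) => x.2 == cm) hj
      -- evaluate one round of B
      have hQk : Q[k]? = some (Q[k]'hk) := List.getElem?_eq_getElem hk
      have hsl : PySem.List.slice Q (some ((k : Int) + 1)) none ++ PySem.List.slice Q none (some (k : Int))
          = Q.drop (k + 1) ++ Q.take k := by
        have hc2 : ((k : Int) + 1) = ((k + 1 : Nat) : Int) := by push_cast; ring
        rw [hc2, PySem.List.slice_from_natCast, PySem.List.slice_to_natCast]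
      have hb : bLoop location Q seq =
          if (Q[k]'hk).1 = location then seq + 1
          else bLoop location (Q.drop (k + 1) ++ Q.take k) (seq + 1) := by
        rw [bLoop]
        split
        · next heq => rw [hm] at heq; cases heq
        · next m heq =>
          have hmcm : m = cm := by rw [hm] at heq; exact (Option.some.inj heq).symm
          subst hmcm
          by_cases hloc0 : (Q[k]'hk).1 = location
          · rw [if_pos hloc0]
            simp only [← hkdef]
            split
            · next h2 => rw [hQk] at h2; cases h2
            · next pp h2 =>
              rw [hQk] at h2
              have hp : pp = Q[k]'hk := (Option.some.inj h2).symm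
              subst hp
              rw [if_pos hloc0]
          · rw [if_neg hloc0]
            simp only [← hkdef]
            split
            · next h2 => rw [hQk] at h2; cases h2
            · next pp h2 =>
              rw [hQk] at h2
              have hp : pp = Q[k]'hk := (Option.some.inj h2).symm
              subst hp
              rw [if_neg hloc0, hsl]
      rw [hb]
      -- fuel bookkeeping
      have hn1 : 1 ≤ n := by simp [hQ] at hlen; omega
      have hnn : n ≤ n * n := Nat.le_mul_of_pos_left n (by omega)
      have hkf : k + 1 ≤ fuel := by omega
      have hfk : fuel = (fuel - (k + 1)) + (k + 1) := by omega
      rw [hfk, rot location sp cmi cm hcm k Q hk hqk hltk]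
      by_cases hloc : (Q[k]'hk).1 = location
      · simp [hloc]
      · simp only [hloc, if_false]
        set Q' : List (Int × Int) := Q.drop (k + 1) ++ Q.take k with hQ'def
        have hlen' : Q'.length = n - 1 := by simp [hQ'def]; omega
        have hsplitQ : Q = Q.take k ++ (Q[k]'hk) :: Q.drop (k + 1) := by
          conv_lhs => rw [← List.take_append_drop k Q, ← List.getElem_cons_drop hk]
        have hcount : ∀ c : Int, (Q.map Prod.snd).count c
            = ((Q'.map Prod.snd).count c) + (if c = cm then 1 else 0) := by
          intro c
          have hkm : k < (Q.map Prod.snd).length := by simpa using hk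
          have hgm : (Q.map Prod.snd)[k]'hkm = cm := by simpa using hqk
          have h2 : Q'.map Prod.snd = (Q.map Prod.snd).drop (k+1) ++ (Q.map Prod.snd).take k := by
            simp [hQ'def]
          rw [h2]
          exact count_rotate _ c cm k hkm hgm
        have hsub : ∀ p ∈ Q', p ∈ Q := by
          intro p hp
          rcases List.mem_append.mp hp with h | h
          · exact List.mem_of_mem_drop h
          · exact List.mem_of_mem_take h
        have hcmdrop : cm ∈ sp.drop cmi := by rw [hdc]; exact List.mem_cons_self
        have hgd : (pc.insert cm (pc.getD cm 0 - 1)).getD cm 0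
            = ((Q.map Prod.snd).count cm : Int) - 1 := by
          rw [PySem.Dict.getD_insert_self, hcnt cm hcmdrop]
        have hcpos : 0 < (Q.map Prod.snd).count cm := List.count_pos_iff.mpr hcmQ
        have hfuel' : (n - 1) * (n - 1) < fuel - (k + 1) := by
          obtain ⟨m, rfl⟩ : ∃ m, n = m + 1 := ⟨n - 1, by omega⟩
          have hkm : k ≤ m := by omega
          have : m * m + (k + 1) ≤ (m + 1) * (m + 1) := by nlinarith
          simp only [Nat.add_sub_cancel]
          omega
        by_cases hone : (Q.map Prod.snd).count cm = 1
        · -- priority class exhausted: pointer moves on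
          have hzero : (pc.insert cm (pc.getD cm 0 - 1)).getD cm 0 = 0 := by rw [hgd, hone]; ring
          rw [if_pos hzero]
          have hcntQ'0 : (Q'.map Prod.snd).count cm = 0 := by
            have := hcount cm
            simp at this
            omega
          have hnotmem : cm ∉ Q'.map Prod.snd := List.count_eq_zero.mp hcntQ'0
          apply ih (n - 1) (by omega) Q' _ _ (seq + 1) _ hlen' _ hfuel'
          refine ⟨hsp, ?_, ?_, ?_⟩
          · intro p hp
            have h := hmem p (hsub p hp)
            rw [hdc] at h
            rcases List.mem_cons.mp h with h | h
            · exfalso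
              exact hnotmem (h ▸ List.mem_map_of_mem hp)
            · exact h
          · intro c hc
            have hne : c ≠ cm := by have := hgt c hc; omega
            rw [PySem.Dict.getD_insert, if_neg hne, hcnt c (by rw [hdc]; exact List.mem_cons_of_mem _ hc), hcount c, if_neg hne]
            simp
          · intro c hc
            have hne : c ≠ cm := by have := hgt c hc; omega
            have h4 := hpos c (by rw [hdc]; exact List.mem_cons_of_mem _ hc)
            rw [← List.count_pos_iff] at h4 ⊢
            have := hcount c
            rw [if_neg hne] at this
            omega
        · -- class still has members: pointer stays
          have hge2 : 2 ≤ (Q.map Prod.snd).count cm := by omega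
          have hnz : ¬ (pc.insert cm (pc.getD cm 0 - 1)).getD cm 0 = 0 := by
            rw [hgd]
            have : (2 : Int) ≤ ((Q.map Prod.snd).count cm : Int) := by exact_mod_cast hge2
            omega
          rw [if_neg hnz]
          apply ih (n - 1) (by omega) Q' _ _ (seq + 1) _ hlen' _ hfuel'
          refine ⟨hsp, ?_, ?_, ?_⟩
          · intro p hp
            exact hmem p (hsub p hp)
          · intro c hc
            by_cases hcc : c = cm
            · rw [hcc, hgd]
              have h5 := hcount cm
              rw [if_pos rfl] at h5
              rw [h5]
              push_cast
              ring
            · rw [PySem.Dict.getD_insert, if_neg hcc, hcnt c hc, hcount c, if_neg hcc]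
              simp
          · intro c hc
            by_cases hcc : c = cm
            · rw [hcc, ← List.count_pos_iff]
              have h5 := hcount cm
              rw [if_pos rfl] at h5
              omega
            · have h4 := hpos c hc
              rw [← List.count_pos_iff] at h4 ⊢
              have := hcount c
              rw [if_neg hcc] at this
              omega


theorem solution_spec' (priorities : List Int) (location : Int) :
    solution priorities location = solution_alt priorities location := by
  unfold solution solution_alt
  set ps := priorities
  set q0 := PySem.List.enumerate ps 0 with hq0
  set pc0 := PySem.Dict.counter ps with hpc0
  set sp := PySem.List.sorted pc0.keys (fun x => x) true with hsp0
  have hkeys : pc0.keys = PySem.Set.ofList ps := PySem.Dict.keys_counter ps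
  have hmemsp : ∀ c, c ∈ sp ↔ c ∈ ps := by
    intro c
    rw [hsp0, PySem.List.mem_sorted, hkeys]
    simp [PySem.Set.mem_ofList]
  have hpair : sp.Pairwise (· > ·) := by
    have h1 : sp.Pairwise (fun a b => b ≤ a) := PySem.List.sorted_pairwise_rev pc0.keys (fun x => x)
    have h2 : sp.Nodup := by
      have := PySem.List.sorted_perm pc0.keys (fun x => x) true
      exact this.nodup_iff.mpr (hkeys ▸ PySem.Set.nodup_ofList ps)
    exact (h1.and h2).imp (fun h => lt_of_le_of_ne h.1 (fun he => h.2 (he.symm ▸ rfl)))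
  have hsnd : q0.map Prod.snd = ps := PySem.List.map_snd_enumerate ps 0
  have hlen0 : q0.length = ps.length := PySem.List.length_enumerate ps 0
  apply main_lemma location sp q0.length q0 pc0 0 0 ((ps.length + 1) * (ps.length + 1)) rfl
  · refine ⟨hpair, ?_, ?_, ?_⟩
    · intro p hp
      rw [List.drop_zero, hmemsp]
      rw [← hsnd]
      exact List.mem_map_of_mem hp
    · intro c hc
      rw [hpc0, PySem.Dict.getD_counter, hsnd]
    · intro c hc
      rw [hsnd]
      rw [List.drop_zero, hmemsp] at hc
      exact hc
  · rw [hlen0]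
    nlinarith

-- ===== VERDICT (by name: the statement is the Claim_ definition above) =====
theorem solution_spec : Claim_equal_solution := by
  intro priorities location _
  unfold Spec_solution
  exact solution_spec' priorities location
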